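-- pv_equiv track=rewrite | github.com/firstcarlos1/family-classifier | app - สำเนา (2).py | is_extended_family
-- ===== SOURCE A (Python) =====
-- def is_extended_family(members):
--     """ครอบครัวขยาย: สามี+ภรรยา+ลูก+ญาติพี่น้อง/พ่อแม่"""
--     core_family = []
--     extended_members = []
--
--     for member in members:
--         if member['relation'] in ['husband', 'wife', 'child']:
--             core_family.append(member)
--         elif member['relation'] in ['father', 'mother', 'grandparent', 'mother-in-law', 'sibling']:
--             extended_members.append(member)
--
--     # ต้องมีครอบครัวแกนกลาง และญาติพี่น้อง
--     husband = any(m['relation'] == 'husband' for m in core_family)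
--     wife = any(m['relation'] == 'wife' for m in core_family)
--
--     return husband and wife and len(extended_members) > 0
-- ===== SOURCE B (Python) =====
-- def is_extended_family(members):
--     """ครอบครัวขยาย: สามี+ภรรยา+ลูก+ญาติพี่น้อง/พ่อแม่"""
--     has_husband = has_wife = has_extended = False
--     for member in members:
--         relation = member['relation']
--         if relation == 'husband':
--             has_husband = True
--         elif relation == 'wife':
--             has_wife = True
--         elif relation in ('father', 'mother', 'grandparent', 'mother-in-law', 'sibling'):
--             has_extended = True
--     return has_husband and has_wife and has_extended
-- ===== Notes on version B (the rewrite author's own statement) =====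
-- stated objective: simpler
-- what changed: Replaces A's two intermediate member lists plus two post-loop any() rescans with three boolean flags accumulated in a single pass; no lists are built and no second traversal happens.
import Mathlib
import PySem

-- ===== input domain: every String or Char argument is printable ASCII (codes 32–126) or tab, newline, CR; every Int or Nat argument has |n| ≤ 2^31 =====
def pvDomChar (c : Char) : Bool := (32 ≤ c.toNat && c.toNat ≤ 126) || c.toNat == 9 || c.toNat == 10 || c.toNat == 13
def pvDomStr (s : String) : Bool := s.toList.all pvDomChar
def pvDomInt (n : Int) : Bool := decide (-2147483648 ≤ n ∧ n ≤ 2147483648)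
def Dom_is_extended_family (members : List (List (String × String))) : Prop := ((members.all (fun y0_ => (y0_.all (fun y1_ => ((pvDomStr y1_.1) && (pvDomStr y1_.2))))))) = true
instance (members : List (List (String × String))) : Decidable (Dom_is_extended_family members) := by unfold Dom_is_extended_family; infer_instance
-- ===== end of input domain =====

-- B is a single-pass three-flag accumulation replacing A's two intermediate lists and post-loop any() rescans (objective: simpler).
-- shared helper: first-match association-list lookup = Python dict subscript member['relation'] (none = KeyError)
def pvLookup : List (String × String) → String → Option String
  | [], _ => none
  | (k, v) :: rest, key => if k == key then some v else pvLookup rest key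

-- ===== PORT A =====
def is_extended_family (members : List (List (String × String))) : Bool :=
  let st := members.foldl
    (fun (st : List (List (String × String)) × List (List (String × String))) member =>
      let r := (pvLookup member "relation").getD ""
      if ["husband", "wife", "child"].contains r then (st.1 ++ [member], st.2)
      else if ["father", "mother", "grandparent", "mother-in-law", "sibling"].contains r then
        (st.1, st.2 ++ [member])
      else st) ([], [])
  let husband := st.1.any (fun m => (pvLookup m "relation").getD "" == "husband")
  let wife := st.1.any (fun m => (pvLookup m "relation").getD "" == "wife")
  husband && wife && decide (st.2.length > 0)

-- ===== PORT B =====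
def is_extended_family_alt (members : List (List (String × String))) : Bool :=
  let fl := members.foldl
    (fun (fl : Bool × Bool × Bool) member =>
      let r := (pvLookup member "relation").getD ""
      if r == "husband" then (true, fl.2.1, fl.2.2)
      else if r == "wife" then (fl.1, true, fl.2.2)
      else if ["father", "mother", "grandparent", "mother-in-law", "sibling"].contains r then
        (fl.1, fl.2.1, true)
      else fl) (false, false, false)
  fl.1 && fl.2.1 && fl.2.2

-- ===== PRECONDITION & SPEC =====
-- Pre_ excludes exactly the inputs where some member dict lacks the 'relation' key: there Python A raises KeyError.
def Pre_is_extended_family (members : List (List (String × String))) : Prop :=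
  (members.all (fun m => m.any (fun p => p.1 == "relation"))) = true
instance (members : List (List (String × String))) : Decidable (Pre_is_extended_family members) := by
  unfold Pre_is_extended_family; infer_instance
def pvWitness_is_extended_family : (List (List (String × String))) :=
  [[("relation", "husband")], [("relation", "wife")], [("relation", "father")]]
def Spec_is_extended_family (members : List (List (String × String))) (out : Bool) : Prop := out = is_extended_family_alt members
instance (members : List (List (String × String))) (out : Bool) : Decidable (Spec_is_extended_family members out) := by unfold Spec_is_extended_family; infer_instance

-- ===== CLAIM (what is proved, stated in full; the proofs are below) =====
def Claim_equal_is_extended_family : Prop := ∀ (members : List (List (String × String))), Dom_is_extended_family members → Pre_is_extended_family members → Spec_is_extended_family members (is_extended_family members)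

-- ===== LEMMAS AND PROOFS =====
-- loop invariant: B's flags summarize A's accumulated lists
theorem pv_fold_inv (members : List (List (String × String)))
    (core ext : List (List (String × String))) :
    (let st := members.foldl
        (fun (st : List (List (String × String)) × List (List (String × String))) member =>
          let r := (pvLookup member "relation").getD ""
          if ["husband", "wife", "child"].contains r then (st.1 ++ [member], st.2)
          else if ["father", "mother", "grandparent", "mother-in-law", "sibling"].contains r then
            (st.1, st.2 ++ [member])
          else st) (core, ext);
      (st.1.any (fun m => (pvLookup m "relation").getD "" == "husband"),
       st.1.any (fun m => (pvLookup m "relation").getD "" == "wife"),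
       decide (st.2.length > 0)))
    = members.foldl
        (fun (fl : Bool × Bool × Bool) member =>
          let r := (pvLookup member "relation").getD ""
          if r == "husband" then (true, fl.2.1, fl.2.2)
          else if r == "wife" then (fl.1, true, fl.2.2)
          else if ["father", "mother", "grandparent", "mother-in-law", "sibling"].contains r then
            (fl.1, fl.2.1, true)
          else fl)
        (core.any (fun m => (pvLookup m "relation").getD "" == "husband"),
         core.any (fun m => (pvLookup m "relation").getD "" == "wife"),
         decide (ext.length > 0)) := by
  induction members generalizing core ext with
  | nil => simp
  | cons m ms ih =>
    simp only [List.foldl_cons]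
    by_cases h1 : (pvLookup m "relation").getD "" = "husband"
    · simpa [h1, List.any_append] using ih (core ++ [m]) ext
    · by_cases h2 : (pvLookup m "relation").getD "" = "wife"
      · simpa [h2, h1, List.any_append] using ih (core ++ [m]) ext
      · by_cases h3 : (pvLookup m "relation").getD "" = "child"
        · simpa [h3, h1, h2, List.any_append] using ih (core ++ [m]) ext
        · by_cases h4 : (pvLookup m "relation").getD "" = "father" ∨
              (pvLookup m "relation").getD "" = "mother" ∨
              (pvLookup m "relation").getD "" = "grandparent" ∨
              (pvLookup m "relation").getD "" = "mother-in-law" ∨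
              (pvLookup m "relation").getD "" = "sibling"
          · simpa [h1, h2, h3, h4, List.any_append] using ih core (ext ++ [m])
          · simpa [h1, h2, h3, h4] using ih core ext

-- ===== VERDICT (by name: the statement is the Claim_ definition above) =====
theorem is_extended_family_spec : Claim_equal_is_extended_family := by
  intro members _ _
  unfold Spec_is_extended_family is_extended_family is_extended_family_alt
  have h := pv_fold_inv members [] []
  simp only [List.any_nil, List.length_nil, gt_iff_lt, lt_irrefl, decide_false] at h
  rw [Prod.ext_iff, Prod.ext_iff] at h
  simp only at h
  simp only [h.1, h.2.1, h.2.2]
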